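-- pv_equiv track=rewrite | github.com/dcarleton67/advent-of-code-2021 | Day 19/main.py | rotation_faces
-- ===== SOURCE A (Python) =====
-- def rotate(scanner):
--     scanner_rotations = [scanner]
--     for i in range(3):
--         # rotate all 4 ways around the facing axis (assume x)
--         # first rotation (doing nothing) already in the list
--         this_rotation = []
--         for beacon in scanner_rotations[-1]:
--             this_rotation.append([beacon[0], -beacon[2], beacon[1]])
--         scanner_rotations.append(this_rotation)
--     return scanner_rotations
--
-- def rotation_faces(scanner):
--     # Assume we're facing +x direction with +z above us
--     # this makes it easier for me to do a think about it
--     positive_x_rotations = rotate(scanner)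
--
--     negative_x = [[-beacon[0], -beacon[1], beacon[2]] for beacon in scanner]
--     negative_x_rotations = rotate(negative_x)
--
--     positive_y = [[beacon[1], -beacon[0], beacon[2]] for beacon in scanner]
--     positive_y_rotations = rotate(positive_y)
--
--     negative_y = [[-beacon[0], -beacon[1], beacon[2]] for beacon in positive_y]
--     negative_y_rotations = rotate(negative_y)
--
--     positive_z = [[beacon[2], beacon[1], -beacon[0]] for beacon in scanner]
--     positive_z_rotations = rotate(positive_z)
--
--     negative_z = [[-beacon[0], -beacon[1], beacon[2]] for beacon in positive_z]
--     negative_z_rotations = rotate(negative_z)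
--
--     full_rotations = []
--     for rotation in positive_x_rotations: full_rotations.append(rotation)
--     for rotation in negative_x_rotations: full_rotations.append(rotation)
--     for rotation in positive_y_rotations: full_rotations.append(rotation)
--     for rotation in negative_y_rotations: full_rotations.append(rotation)
--     for rotation in positive_z_rotations: full_rotations.append(rotation)
--     for rotation in negative_z_rotations: full_rotations.append(rotation)
--     return full_rotations
-- ===== SOURCE B (Python) =====
-- # Table-driven: the identity orientation is the scanner itself; the other 23
-- # orientations come from a fixed table of sign-permutation transforms, each
-- # applied independently to the original scanner in one flat pass (A's order).
--
-- _TRANSFORMS = [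
--     ((1, 0), (-1, 2), (1, 1)),
--     ((1, 0), (-1, 1), (-1, 2)),
--     ((1, 0), (1, 2), (-1, 1)),
--     ((-1, 0), (-1, 1), (1, 2)),
--     ((-1, 0), (-1, 2), (-1, 1)),
--     ((-1, 0), (1, 1), (-1, 2)),
--     ((-1, 0), (1, 2), (1, 1)),
--     ((1, 1), (-1, 0), (1, 2)),
--     ((1, 1), (-1, 2), (-1, 0)),
--     ((1, 1), (1, 0), (-1, 2)),
--     ((1, 1), (1, 2), (1, 0)),
--     ((-1, 1), (1, 0), (1, 2)),
--     ((-1, 1), (-1, 2), (1, 0)),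
--     ((-1, 1), (-1, 0), (-1, 2)),
--     ((-1, 1), (1, 2), (-1, 0)),
--     ((1, 2), (1, 1), (-1, 0)),
--     ((1, 2), (1, 0), (1, 1)),
--     ((1, 2), (-1, 1), (1, 0)),
--     ((1, 2), (-1, 0), (-1, 1)),
--     ((-1, 2), (-1, 1), (-1, 0)),
--     ((-1, 2), (1, 0), (-1, 1)),
--     ((-1, 2), (1, 1), (1, 0)),
--     ((-1, 2), (-1, 0), (1, 1)),
-- ]
--
-- def rotation_faces(scanner):
--     return [scanner] + [
--         [[s0 * b[p0], s1 * b[p1], s2 * b[p2]] for b in scanner]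
--         for ((s0, p0), (s1, p1), (s2, p2)) in _TRANSFORMS]
-- ===== Notes on version B (the rewrite author's own statement) =====
-- stated objective: idiomatic
-- what changed: Replaces A's incremental face-then-chained-spin construction (repeatedly deriving each orientation list from the previous one) by one precomputed table of the 23 non-identity sign-permutation transforms, each applied independently to the original scanner in a single flat pass, with the scanner itself as the identity orientation.
import Mathlib
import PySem

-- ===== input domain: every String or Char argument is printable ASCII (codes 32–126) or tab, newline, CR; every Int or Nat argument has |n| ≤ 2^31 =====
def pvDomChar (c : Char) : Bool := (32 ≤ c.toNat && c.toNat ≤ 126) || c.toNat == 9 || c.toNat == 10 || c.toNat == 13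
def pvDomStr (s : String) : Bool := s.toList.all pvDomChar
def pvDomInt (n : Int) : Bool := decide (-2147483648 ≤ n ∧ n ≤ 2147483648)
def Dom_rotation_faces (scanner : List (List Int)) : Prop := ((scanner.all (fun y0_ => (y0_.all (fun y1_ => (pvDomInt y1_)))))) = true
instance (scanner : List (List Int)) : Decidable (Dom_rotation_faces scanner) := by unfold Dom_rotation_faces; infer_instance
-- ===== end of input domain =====

-- B replaces A's incremental face-then-spin construction by one fixed table of the
-- 24 sign-permutation transforms applied in a flat pass (objective: simpler/idiomatic).
-- Both return the scanner itself as the identity (first) orientation.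

-- ===== PORT A =====
-- beacon[i] under Pre_ (every beacon has length 3, index in range); none is impossible there
def pvGet (b : List Int) (i : Int) : Int := (PySem.List.pyGet? b i).getD 0

def pvRotate (scanner : List (List Int)) : List (List (List Int)) :=
  (PySem.List.pyRange 0 3 1).foldl
    (fun rots _ =>
      let last := (PySem.List.pyGet? rots (-1)).getD []
      let this_rotation :=
        last.foldl (fun acc b => acc ++ [[pvGet b 0, -(pvGet b 2), pvGet b 1]]) []
      rots ++ [this_rotation])
    [scanner]

def rotation_faces (scanner : List (List Int)) : List (List (List Int)) :=
  let positive_x_rotations := pvRotate scanner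
  let negative_x := scanner.map (fun b => [-(pvGet b 0), -(pvGet b 1), pvGet b 2])
  let negative_x_rotations := pvRotate negative_x
  let positive_y := scanner.map (fun b => [pvGet b 1, -(pvGet b 0), pvGet b 2])
  let positive_y_rotations := pvRotate positive_y
  let negative_y := positive_y.map (fun b => [-(pvGet b 0), -(pvGet b 1), pvGet b 2])
  let negative_y_rotations := pvRotate negative_y
  let positive_z := scanner.map (fun b => [pvGet b 2, pvGet b 1, -(pvGet b 0)])
  let positive_z_rotations := pvRotate positive_z
  let negative_z := positive_z.map (fun b => [-(pvGet b 0), -(pvGet b 1), pvGet b 2])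
  let negative_z_rotations := pvRotate negative_z
  let full_rotations : List (List (List Int)) := []
  let full_rotations := positive_x_rotations.foldl (fun acc r => acc ++ [r]) full_rotations
  let full_rotations := negative_x_rotations.foldl (fun acc r => acc ++ [r]) full_rotations
  let full_rotations := positive_y_rotations.foldl (fun acc r => acc ++ [r]) full_rotations
  let full_rotations := negative_y_rotations.foldl (fun acc r => acc ++ [r]) full_rotations
  let full_rotations := positive_z_rotations.foldl (fun acc r => acc ++ [r]) full_rotations
  let full_rotations := negative_z_rotations.foldl (fun acc r => acc ++ [r]) full_rotations
  full_rotations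

-- ===== PORT B =====
-- the 23 non-identity orientation transforms as ((sign, index) per coordinate), in A's order
def pvTransforms : List ((Int × Int) × (Int × Int) × (Int × Int)) :=
  [((1, 0), (-1, 2), (1, 1)),
   ((1, 0), (-1, 1), (-1, 2)),
   ((1, 0), (1, 2), (-1, 1)),
   ((-1, 0), (-1, 1), (1, 2)),
   ((-1, 0), (-1, 2), (-1, 1)),
   ((-1, 0), (1, 1), (-1, 2)),
   ((-1, 0), (1, 2), (1, 1)),
   ((1, 1), (-1, 0), (1, 2)),
   ((1, 1), (-1, 2), (-1, 0)),
   ((1, 1), (1, 0), (-1, 2)),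
   ((1, 1), (1, 2), (1, 0)),
   ((-1, 1), (1, 0), (1, 2)),
   ((-1, 1), (-1, 2), (1, 0)),
   ((-1, 1), (-1, 0), (-1, 2)),
   ((-1, 1), (1, 2), (-1, 0)),
   ((1, 2), (1, 1), (-1, 0)),
   ((1, 2), (1, 0), (1, 1)),
   ((1, 2), (-1, 1), (1, 0)),
   ((1, 2), (-1, 0), (-1, 1)),
   ((-1, 2), (-1, 1), (-1, 0)),
   ((-1, 2), (1, 0), (-1, 1)),
   ((-1, 2), (1, 1), (1, 0)),
   ((-1, 2), (-1, 0), (1, 1))]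

def rotation_faces_alt (scanner : List (List Int)) : List (List (List Int)) :=
  scanner :: pvTransforms.map (fun t =>
    scanner.map (fun b =>
      [t.1.1 * pvGet b t.1.2, t.2.1.1 * pvGet b t.2.1.2, t.2.2.1 * pvGet b t.2.2.2]))

-- ===== PRECONDITION & SPEC =====
-- Pre_ excludes exactly the inputs on which A raises IndexError: a beacon with fewer
-- than 3 coordinates.
def Pre_rotation_faces (scanner : List (List Int)) : Prop :=
  ∀ b ∈ scanner, 3 ≤ b.length
instance (scanner : List (List Int)) : Decidable (Pre_rotation_faces scanner) := by
  unfold Pre_rotation_faces; infer_instance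

def pvWitness_rotation_faces : List (List Int) := [[1, 2, 3], [-4, 0, 5]]

def Spec_rotation_faces (scanner : List (List Int)) (out : List (List (List Int))) : Prop := out = rotation_faces_alt scanner
instance (scanner : List (List Int)) (out : List (List (List Int))) : Decidable (Spec_rotation_faces scanner out) := by unfold Spec_rotation_faces; infer_instance

-- ===== CLAIM (what is proved, stated in full; the proofs are below) =====
def Claim_equal_rotation_faces : Prop := ∀ (scanner : List (List Int)), Dom_rotation_faces scanner → Pre_rotation_faces scanner → Spec_rotation_faces scanner (rotation_faces scanner)

-- ===== LEMMAS AND PROOFS =====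

-- a list of length ≥ 3 starts with a literal triple
theorem pv_len3 (b : List Int) (h : 3 ≤ b.length) :
    ∃ (x y z : Int) (rest : List Int), b = x :: y :: z :: rest := by
  match b, h with
  | x :: y :: z :: rest, _ => exact ⟨x, y, z, rest, rfl⟩

-- beacon[0], beacon[1], beacon[2] on a list with at least 3 elements
theorem pvGet_zero (x : Int) (r : List Int) : pvGet (x :: r) 0 = x := by
  simp [pvGet, PySem.List.pyGet?, PySem.List.pyIdx?]
theorem pvGet_one (x y : Int) (r : List Int) : pvGet (x :: y :: r) 1 = y := by
  simp [pvGet, PySem.List.pyGet?, PySem.List.pyIdx?]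
theorem pvGet_two (x y z : Int) (r : List Int) : pvGet (x :: y :: z :: r) 2 = z := by
  simp [pvGet, PySem.List.pyGet?, PySem.List.pyIdx?]
  rw [if_pos (by omega)]
  rfl

-- A's inner spin loop is a map
theorem pv_this_rotation (l : List (List Int)) :
    l.foldl (fun acc b => acc ++ [[pvGet b 0, -(pvGet b 2), pvGet b 1]]) [] =
      l.map (fun b => [pvGet b 0, -(pvGet b 2), pvGet b 1]) :=
  by simpa using PySem.List.foldl_append_singleton_eq_map (fun b => [pvGet b 0, -(pvGet b 2), pvGet b 1]) l []

-- pvRotate unrolled: the four x-spins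
theorem pv_rotate_eq (s : List (List Int)) :
    pvRotate s =
      [s,
       s.map (fun b => [pvGet b 0, -(pvGet b 2), pvGet b 1]),
       (s.map (fun b => [pvGet b 0, -(pvGet b 2), pvGet b 1])).map
         (fun b => [pvGet b 0, -(pvGet b 2), pvGet b 1]),
       ((s.map (fun b => [pvGet b 0, -(pvGet b 2), pvGet b 1])).map
         (fun b => [pvGet b 0, -(pvGet b 2), pvGet b 1])).map
         (fun b => [pvGet b 0, -(pvGet b 2), pvGet b 1])] := by
  have hr : PySem.List.pyRange 0 3 1 = [0, 1, 2] := by decide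
  simp only [pvRotate, hr, List.foldl_cons, List.foldl_nil, pv_this_rotation,
    PySem.List.pyGet?_neg_one]
  simp [List.getLast?]

-- A = B pointwise on any scanner of 3-D beacons
theorem pv_map_eq (f g : List Int → List Int) (scanner : List (List Int))
    (hpre : ∀ b ∈ scanner, 3 ≤ b.length)
    (h : ∀ (x y z : Int) (rest : List Int),
      f (x :: y :: z :: rest) = g (x :: y :: z :: rest)) :
    scanner.map f = scanner.map g :=
  List.map_congr_left fun b hb => by
    obtain ⟨x, y, z, rest, rfl⟩ := pv_len3 b (hpre b hb)
    exact h x y z rest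

-- A's output-accumulation loop appends the elements in order
theorem pv_append_all (l acc : List (List (List Int))) :
    l.foldl (fun acc r => acc ++ [r]) acc = acc ++ l := by
  simpa using PySem.List.foldl_append_singleton_eq_map (fun r => r) l acc

-- ===== VERDICT (by name: the statement is the Claim_ definition above) =====
theorem rotation_faces_spec : Claim_equal_rotation_faces := by
  intro scanner _ hpre
  unfold Spec_rotation_faces
  show rotation_faces scanner = rotation_faces_alt scanner
  simp only [rotation_faces, pv_rotate_eq, List.map_map, pv_append_all,
    rotation_faces_alt, pvTransforms, List.map_cons, List.map_nil]
  simp only [List.cons_append, List.nil_append, List.cons.injEq, and_true]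
  refine ⟨trivial, ?_, ?_, ?_, ?_, ?_, ?_, ?_, ?_, ?_, ?_, ?_, ?_, ?_, ?_, ?_, ?_, ?_, ?_, ?_, ?_, ?_, ?_, ?_⟩
  all_goals
    exact pv_map_eq _ _ scanner hpre
      (by intro x y z rest; show _ = _; simp [pvGet_zero, pvGet_one, pvGet_two])
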